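-- pv_equiv track=rewrite | github.com/lsmman/All-about-Algorithms | python-baekjoon/1011.py | get_available_max_distances
-- ===== SOURCE A (Python) =====
-- def get_available_max_distances(term):
--     distances = [0]
--     moving = distances[0]
--     add_ = 0
--     odd = True
--
--     while term > moving:
--         if odd:
--             add_ += 1
--         moving += add_
--         distances.append(moving)
--         odd = not odd
--
--     return distances
-- ===== SOURCE B (Python) =====
-- def get_available_max_distances(term):
--     # Phase 1: over-generate the sequence in (square, pronic) pairs: m*m, m*(m+1)
--     blocks = [0]
--     m = 1
--     while blocks[-1] < term:
--         blocks.append(m * m)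
--         blocks.append(m * (m + 1))
--         m += 1
--     # Phase 2: trim to the prefix ending at the first element >= term
--     out = []
--     for v in blocks:
--         out.append(v)
--         if v >= term:
--             break
--     return out
-- ===== Notes on version B (the rewrite author's own statement) =====
-- stated objective: alternative
-- what changed: Replaces the single incremental add_/odd/moving summation loop by two staged passes: first over-generate the sequence two elements per iteration as explicit squares m*m and pronics m*(m+1), then a separate trim pass that cuts at the first element >= term.
import Mathlib
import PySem

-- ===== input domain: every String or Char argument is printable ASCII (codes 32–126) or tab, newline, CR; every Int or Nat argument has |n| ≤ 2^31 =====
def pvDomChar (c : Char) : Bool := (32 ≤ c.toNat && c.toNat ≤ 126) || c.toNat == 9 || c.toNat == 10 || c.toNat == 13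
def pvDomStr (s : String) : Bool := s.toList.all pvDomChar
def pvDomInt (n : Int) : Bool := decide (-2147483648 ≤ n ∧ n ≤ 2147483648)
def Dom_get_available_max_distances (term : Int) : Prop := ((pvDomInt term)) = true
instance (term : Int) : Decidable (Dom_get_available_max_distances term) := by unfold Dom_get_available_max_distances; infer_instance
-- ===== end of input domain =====

-- B is an alternative decomposition of A (same cost): generate the sequence in (square, pronic)
-- pairs, then trim at the first element >= term, instead of A's incremental running summation.

-- ===== PORT A =====
-- loop of A: while term > moving: (if odd: add_+=1); moving += add_; append; odd = not odd
-- fuel only makes the recursion total: with s = Nat.sqrt term.toNat, the appended value at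
-- index 2*(s+1) is (s+1)*(s+2) > term, so the guard term > moving fails before fuel runs out
-- distances is carried in REVERSE (cons instead of append, one final reverse):
-- same loop, same state, linear instead of quadratic list building
def pvLoopA (fuel : Nat) (term moving add_ : Int) (odd : Bool) (rdistances : List Int) : List Int :=
  match fuel with
  | 0 => rdistances
  | Nat.succ fuel =>
    if term > moving then
      let add_' := if odd then add_ + 1 else add_
      let moving' := moving + add_'
      pvLoopA fuel term moving' add_' (!odd) (moving' :: rdistances)
    else rdistances

def get_available_max_distances (term : Int) : List Int :=
  -- distances = [0]; moving = distances[0] = 0; add_ = 0; odd = True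
  (pvLoopA (2 * (Nat.sqrt term.toNat + 2)) term 0 0 true [0]).reverse

-- ===== PORT B =====
-- phase 1 of B: while blocks[-1] < term: blocks.append(m*m); blocks.append(m*(m+1)); m += 1
-- fuel only makes the recursion total: with s = Nat.sqrt term.toNat, after iteration m = s+1
-- the last element is (s+1)*(s+2) > term, so the guard blocks[-1] < term fails within the fuel
-- blocks is carried in REVERSE (cons instead of append, one final reverse), so the
-- Python read blocks[-1] is the head of the carried list
def pvGen (fuel : Nat) (term m : Int) (rblocks : List Int) : List Int :=
  match fuel with
  | 0 => rblocks
  | Nat.succ fuel =>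
    match rblocks with
    | [] => rblocks   -- unreachable: blocks is never empty
    | last :: _ =>
      if last < term then
        pvGen fuel term (m + 1) (m * (m + 1) :: m * m :: rblocks)
      else rblocks

-- phase 2 of B: for v in blocks: out.append(v); if v >= term: break
-- out is carried in REVERSE (cons instead of append, one final reverse), tail-recursively
def pvTrim (term : Int) (out : List Int) : List Int → List Int
  | [] => out.reverse
  | v :: rest => if v ≥ term then (v :: out).reverse else pvTrim term (v :: out) rest

def get_available_max_distances_alt (term : Int) : List Int :=
  pvTrim term [] (pvGen (Nat.sqrt term.toNat + 2) term 1 [0]).reverse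

-- ===== PRECONDITION & SPEC =====
def Spec_get_available_max_distances (term : Int) (out : List Int) : Prop := out = get_available_max_distances_alt term
instance (term : Int) (out : List Int) : Decidable (Spec_get_available_max_distances term out) := by unfold Spec_get_available_max_distances; infer_instance

-- ===== CLAIM (what is proved, stated in full; the proofs are below) =====
def Claim_equal_get_available_max_distances : Prop := ∀ (term : Int), Dom_get_available_max_distances term → Spec_get_available_max_distances term (get_available_max_distances term)

-- ===== LEMMAS AND PROOFS =====

-- closed form of the k-th appended value of the common sequence 0, 1, 2, 4, 6, 9, 12, …
def pvF (k : Int) : Int := if k % 2 = 0 then (k / 2) * (k / 2 + 1) else ((k + 1) / 2) ^ 2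

-- reference loop: one element per step, last := pvF k; used as a bridge between the two ports
def pvLoopR (fuel : Nat) (term k last : Int) (acc : List Int) : List Int :=
  match fuel with
  | 0 => acc
  | Nat.succ fuel =>
    if last < term then
      pvLoopR fuel term (k + 1) (pvF k) (pvF k :: acc)
    else acc

lemma pvF_step (k : Int) (_hk : 1 ≤ k) :
    pvF (k - 1) + (if k % 2 = 1 then k / 2 + 1 else k / 2) = pvF k := by
  rcases Int.even_or_odd k with ⟨m, hm⟩ | ⟨m, hm⟩
  · have h0 : k % 2 = 0 := by omega
    have h1 : (k - 1) % 2 = 1 := by omega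
    have d0 : k / 2 = m := by omega
    have d1 : (k - 1 + 1) / 2 = m := by omega
    simp only [pvF, h0, h1, d0, d1]
    norm_num; ring
  · have h0 : k % 2 = 1 := by omega
    have h1 : (k - 1) % 2 = 0 := by omega
    have d0 : k / 2 = m := by omega
    have d1 : (k - 1) / 2 = m := by omega
    have d2 : (k + 1) / 2 = m + 1 := by omega
    simp only [pvF, h0, h1, d0, d1, d2]
    norm_num; ring

-- A's loop equals the reference loop
lemma pvLoopA_eq_R : ∀ (fuel : Nat) (term k : Int) (acc : List Int), 1 ≤ k →
    pvLoopA fuel term (pvF (k - 1)) (k / 2) (decide (k % 2 = 1)) acc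
      = pvLoopR fuel term k (pvF (k - 1)) acc := by
  intro fuel
  induction fuel with
  | zero => intro term k acc _; rfl
  | succ fuel ih =>
    intro term k acc hk
    have hstep := pvF_step k hk
    have hk1 : k + 1 - 1 = k := by ring
    by_cases hlt : pvF (k - 1) < term
    · by_cases h0 : k % 2 = 1
      · have hd : decide (k % 2 = 1) = true := by simpa using h0
        have dk : (k + 1) / 2 = k / 2 + 1 := by omega
        rw [if_pos h0] at hstep
        simp only [pvLoopA, pvLoopR, gt_iff_lt, if_pos hlt, hd, Bool.not_true]
        norm_num
        rw [hstep]
        have hrec := ih term (k + 1) (pvF k :: acc) (by omega)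
        rw [hk1, dk, show decide ((k + 1) % 2 = 1) = false from by simp; omega] at hrec
        exact hrec
      · have hd : decide (k % 2 = 1) = false := by simpa using h0
        have dk : (k + 1) / 2 = k / 2 := by omega
        rw [if_neg h0] at hstep
        simp only [pvLoopA, pvLoopR, gt_iff_lt, if_pos hlt, hd, Bool.not_false]
        norm_num
        rw [hstep]
        have hrec := ih term (k + 1) (pvF k :: acc) (by omega)
        rw [hk1, dk, show decide ((k + 1) % 2 = 1) = true from by simp; omega] at hrec
        exact hrec
    · simp only [pvLoopA, pvLoopR, gt_iff_lt, if_neg hlt]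

-- proof-side simple (non-accumulator) version of the trim pass
def pvT (term : Int) : List Int → List Int
  | [] => []
  | v :: rest => v :: (if v ≥ term then [] else pvT term rest)

lemma pvTrim_eq_pvT (term : Int) : ∀ (xs out : List Int),
    pvTrim term out xs = out.reverse ++ pvT term xs := by
  intro xs
  induction xs with
  | nil => intro out; simp [pvTrim, pvT]
  | cons v rest ih =>
    intro out
    by_cases h : v ≥ term
    · simp [pvTrim, pvT, if_pos h]
    · simp only [pvTrim, pvT, if_neg h, ih (v :: out), List.reverse_cons]
      simp

lemma pvTrim_append (term : Int) (pre rest : List Int) (h : ∀ v ∈ pre, v < term) :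
    pvT term (pre ++ rest) = pre ++ pvT term rest := by
  induction pre with
  | nil => simp
  | cons x xs ih =>
    have hx : ¬ (x ≥ term) := by have := h x (by simp); omega
    simp only [List.cons_append, pvT, if_neg hx]
    rw [ih (fun v hv => h v (by simp [hv]))]

lemma pvTrim_singleton (term L : Int) : pvT term [L] = [L] := by
  by_cases h : L ≥ term <;> simp [pvT, h]

lemma pvF_odd (m : Int) (_hm : 1 ≤ m) : pvF (2 * m - 1) = m * m := by
  have h1 : (2 * m - 1) % 2 = 1 := by omega
  have h2 : (2 * m - 1 + 1) / 2 = m := by omega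
  simp only [pvF, h1, h2]; norm_num; ring

lemma pvF_even (m : Int) : pvF (2 * m) = m * (m + 1) := by
  have h1 : (2 * m) % 2 = 0 := by omega
  have h2 : (2 * m) / 2 = m := by omega
  simp only [pvF, h1, h2]; norm_num

lemma pvTrim_rev_all_lt (term L : Int) (rinit : List Int) (h : ∀ v ∈ rinit, v < term) :
    pvT term (L :: rinit).reverse = (L :: rinit).reverse := by
  rw [List.reverse_cons,
    pvTrim_append term _ _ (fun v hv => h v (List.mem_reverse.mp hv)), pvTrim_singleton]

-- B's two phases equal the reference loop (both lists carried in reverse)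
lemma pvGen_trim_eq_R : ∀ (fuel : Nat) (m term : Int) (rinit : List Int), 1 ≤ m →
    (∀ v ∈ rinit, v < term) →
    pvT term (pvGen fuel term m (pvF (2 * m - 2) :: rinit)).reverse
      = (pvLoopR (2 * fuel) term (2 * m - 1) (pvF (2 * m - 2)) (pvF (2 * m - 2) :: rinit)).reverse := by
  intro fuel
  induction fuel with
  | zero =>
    intro m term rinit _ hinit
    simp only [pvGen, pvLoopR, pvTrim_rev_all_lt term _ rinit hinit]
  | succ fuel ih =>
    intro m term rinit hm hinit
    have e2 : 2 * m - 1 + 1 = 2 * m := by ring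
    have hRfuel : 2 * (fuel + 1) = 2 * fuel + 1 + 1 := by ring
    have hodd := pvF_odd m hm
    have heven := pvF_even m
    by_cases hlt : pvF (2 * m - 2) < term
    · by_cases hsq : m * m < term
      · -- both extra elements are needed; use the IH
        have hsq' : pvF (2 * m - 1) < term := by rw [hodd]; exact hsq
        have hinit' : ∀ v ∈ pvF (2 * m - 1) :: pvF (2 * m - 2) :: rinit, v < term := by
          intro v hv
          simp only [List.mem_cons] at hv
          rcases hv with h | h | h
          · rw [h]; exact hsq'
          · rw [h]; exact hlt
          · exact hinit v h
        have hrec := ih (m + 1) term (pvF (2 * m - 1) :: pvF (2 * m - 2) :: rinit)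
          (by omega) hinit'
        rw [show 2 * (m + 1) - 2 = 2 * m from by ring,
          show 2 * (m + 1) - 1 = 2 * m + 1 from by ring] at hrec
        simp only [pvGen, if_pos hlt]
        rw [show m * (m + 1) :: m * m :: pvF (2 * m - 2) :: rinit
            = pvF (2 * m) :: pvF (2 * m - 1) :: pvF (2 * m - 2) :: rinit from by
              rw [hodd, heven], hrec, hRfuel]
        simp only [pvLoopR, if_pos hlt, if_pos hsq', e2]
      · -- m*m ≥ term: the inner recursion stops immediately (m*(m+1) ≥ m*m ≥ term)
        have hsq' : ¬ pvF (2 * m - 1) < term := by rw [hodd]; exact hsq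
        have hpr : ¬ (m * (m + 1) < term) := by nlinarith
        have hstop : pvGen fuel term (m + 1)
            (m * (m + 1) :: m * m :: pvF (2 * m - 2) :: rinit)
            = m * (m + 1) :: m * m :: pvF (2 * m - 2) :: rinit := by
          cases fuel with
          | zero => rfl
          | succ f => simp only [pvGen, if_neg hpr]
        have hpre : ∀ v ∈ (pvF (2 * m - 2) :: rinit).reverse, v < term := by
          intro v hv
          rw [List.mem_reverse] at hv
          rcases List.mem_cons.mp hv with h | h
          · rw [h]; exact hlt
          · exact hinit v h
        simp only [pvGen, if_pos hlt]
        rw [hstop, show (m * (m + 1) :: m * m :: pvF (2 * m - 2) :: rinit).reverse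
            = (pvF (2 * m - 2) :: rinit).reverse ++ ([m * m] ++ [m * (m + 1)]) from by simp,
          pvTrim_append term _ _ hpre,
          show pvT term ([m * m] ++ [m * (m + 1)]) = [m * m] from by
            simp only [List.singleton_append, pvT, if_pos (by omega : m * m ≥ term)],
          hRfuel]
        simp only [pvLoopR, if_pos hlt, e2, if_neg hsq']
        rw [hodd]
        simp
    · -- guard already false: both sides return the current list
      simp only [pvGen, if_neg hlt, pvLoopR,
        pvTrim_rev_all_lt term _ rinit hinit]

-- ===== VERDICT (by name: the statement is the Claim_ definition above) =====
theorem get_available_max_distances_spec : Claim_equal_get_available_max_distances := by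
  intro term _
  unfold Spec_get_available_max_distances get_available_max_distances get_available_max_distances_alt
  have hA := pvLoopA_eq_R (2 * (Nat.sqrt term.toNat + 2)) term 1 [0] (by norm_num)
  have hB := pvGen_trim_eq_R (Nat.sqrt term.toNat + 2) 1 term [] (by norm_num)
    (by intro v hv; simp at hv)
  norm_num [pvF] at hA hB
  rw [hA, pvTrim_eq_pvT]
  simpa using hB.symm
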